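-- pv_equiv track=rewrite | github.com/Operating-Systems-Group6-Project1/Operating-Systems-Group-Project | Question1/FIFO.py | waitTime
-- ===== SOURCE A (Python) =====
-- def waitTime(csv_reader):
--   Wait_Times = []
--   Wait_Time = 0
--   for process in csv_reader:
--     if process != "Bursttime":
--       Wait_Times.append(Wait_Time)
--       Wait_Time+=int(process)
--   return Wait_Times
-- ===== SOURCE B (Python) =====
-- def waitTime(csv_reader):
--     nums = [int(p) for p in csv_reader if p != "Bursttime"]
--     total = sum(nums)
--     out = []
--     for x in reversed(nums):
--         total -= x
--         out.append(total)
--     out.reverse()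
--     return out
-- ===== Notes on version B (the rewrite author's own statement) =====
-- stated objective: alternative
-- what changed: Instead of accumulating exclusive prefix sums forward, B computes each wait as the total burst time minus a suffix sum, walking the cleaned list in reverse and building the output back-to-front.
import Mathlib
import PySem

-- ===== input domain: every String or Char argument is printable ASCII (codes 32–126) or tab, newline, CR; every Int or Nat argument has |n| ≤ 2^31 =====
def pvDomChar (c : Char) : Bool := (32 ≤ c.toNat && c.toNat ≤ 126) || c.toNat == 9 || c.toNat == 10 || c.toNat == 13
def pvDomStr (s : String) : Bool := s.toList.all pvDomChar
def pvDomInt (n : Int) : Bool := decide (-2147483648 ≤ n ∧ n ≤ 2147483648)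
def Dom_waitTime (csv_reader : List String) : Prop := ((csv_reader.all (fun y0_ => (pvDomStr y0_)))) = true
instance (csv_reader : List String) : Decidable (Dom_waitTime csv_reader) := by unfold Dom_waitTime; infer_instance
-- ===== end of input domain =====

-- B computes each wait as total burst time minus a suffix sum, walking the cleaned
-- list in reverse and building the output back-to-front (alternative strategy, same cost).

-- ===== PORT A =====
-- one loop: append the running sum, then add int(process); int() exact via PySem.Int.ofStr?
-- (Pre_ guarantees the parse succeeds, so the getD 0 default is never taken inside Pre_)
def waitTime (csv_reader : List String) : List Int :=
  (csv_reader.foldl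
    (fun (st : List Int × Int) process =>
      if process ≠ "Bursttime" then
        (st.1 ++ [st.2], st.2 + (PySem.Int.ofStr? process).getD 0)
      else st)
    ([], 0)).1

-- ===== PORT B =====
-- pass 1: filter/convert; pass 2: total = sum; pass 3: reversed loop subtracting each
-- burst from total and appending; finally reverse the output
def waitTime_alt (csv_reader : List String) : List Int :=
  let nums := (csv_reader.filter (fun p => p ≠ "Bursttime")).map
    (fun p => (PySem.Int.ofStr? p).getD 0)
  let total : Int := nums.sum
  let out := (nums.reverse.foldl
    (fun (st : Int × List Int) x => (st.1 - x, st.2 ++ [st.1 - x]))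
    (total, [])).2
  out.reverse

-- ===== PRECONDITION & SPEC =====
-- Pre_ excludes exactly the inputs where Python's int(process) raises ValueError
def Pre_waitTime (csv_reader : List String) : Prop :=
  (csv_reader.all (fun p => p == "Bursttime" || (PySem.Int.ofStr? p).isSome)) = true
instance (csv_reader : List String) : Decidable (Pre_waitTime csv_reader) := by
  unfold Pre_waitTime; infer_instance
def pvWitness_waitTime : List String := ["Bursttime", "3", "5", "2"]
def Spec_waitTime (csv_reader : List String) (out : List Int) : Prop := out = waitTime_alt csv_reader
instance (csv_reader : List String) (out : List Int) : Decidable (Spec_waitTime csv_reader out) := by unfold Spec_waitTime; infer_instance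

-- ===== CLAIM (what is proved, stated in full; the proofs are below) =====
def Claim_equal_waitTime : Prop := ∀ (csv_reader : List String), Dom_waitTime csv_reader → Pre_waitTime csv_reader → Spec_waitTime csv_reader (waitTime csv_reader)

-- ===== LEMMAS AND PROOFS =====

-- A's loop invariant: fold from (acc, s) yields acc ++ exclusive prefix sums starting at s
theorem waitTime_fold_inv (xs : List String) : ∀ (acc : List Int) (s : Int),
    (xs.foldl
      (fun (st : List Int × Int) process =>
        if process ≠ "Bursttime" then
          (st.1 ++ [st.2], st.2 + (PySem.Int.ofStr? process).getD 0)
        else st)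
      (acc, s)).1
    = acc ++ (((xs.filter (fun p => p ≠ "Bursttime")).map
        (fun p => (PySem.Int.ofStr? p).getD 0)).scanl (· + ·) s).dropLast := by
  induction xs with
  | nil => intro acc s; simp
  | cons x xs ih =>
    intro acc s
    by_cases hx : x = "Bursttime"
    · simp only [List.foldl_cons, List.filter_cons, hx]
      simpa using ih acc s
    · have hscan : ∀ (l : List Int) (b : Int), (l.scanl (· + ·) b) ≠ [] := by
        intro l b; cases l <;> simp [List.scanl]
      rw [List.foldl_cons, if_pos hx, ih,
        List.filter_cons_of_pos (by simpa using hx), List.map_cons, List.scanl_cons,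
        List.dropLast_cons_of_ne_nil (hscan _ _), List.append_assoc]
      rfl

-- B's loop invariant: the reversed fold's output list is acc ++ tail of scanl (·-·) t
theorem alt_fold_inv (l : List Int) : ∀ (t : Int) (acc : List Int),
    (l.foldl (fun (st : Int × List Int) x => (st.1 - x, st.2 ++ [st.1 - x])) (t, acc)).2
    = acc ++ (l.scanl (· - ·) t).tail := by
  induction l with
  | nil => intro t acc; simp [List.scanl]
  | cons x l ih =>
    intro t acc
    simp only [List.foldl_cons, List.scanl_cons, List.tail_cons]
    rw [ih, List.append_assoc]
    have hc : List.scanl (· - ·) (t - x) l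
        = (t - x) :: (List.scanl (· - ·) (t - x) l).tail := by
      cases l <;> simp [List.scanl]
    conv_rhs => rw [hc]
    simp

-- appending one element to a scanl (+) appends one final partial sum
theorem scanl_add_concat (ys : List Int) : ∀ (b y : Int),
    List.scanl (· + ·) b (ys ++ [y]) = List.scanl (· + ·) b ys ++ [b + (ys.sum + y)] := by
  induction ys with
  | nil => intro b y; simp [List.scanl]
  | cons x ys ih =>
    intro b y
    simp only [List.cons_append, List.scanl_cons, ih, List.sum_cons]
    have : b + x + (ys.sum + y) = b + (x + ys.sum + y) := by ring
    rw [this]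

-- a scanl (+) equals its dropLast plus the final total
theorem scanl_add_self (ys : List Int) (b : Int) :
    List.scanl (· + ·) b ys = (List.scanl (· + ·) b ys).dropLast ++ [b + ys.sum] := by
  induction ys using List.reverseRecOn with
  | nil => simp [List.scanl]
  | append_singleton zs z _ =>
    rw [scanl_add_concat, List.dropLast_concat]; simp

-- core symmetry: reversing the backward subtractive scan gives the forward additive scan
theorem scanl_sub_reverse (ys : List Int) :
    ((ys.reverse.scanl (· - ·) ys.sum).tail).reverse = (List.scanl (· + ·) 0 ys).dropLast := by
  induction ys using List.reverseRecOn with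
  | nil => simp [List.scanl]
  | append_singleton ys y ih =>
    rw [List.reverse_append, List.reverse_singleton, List.singleton_append,
      List.scanl_cons, List.tail_cons]
    have hsum : (ys ++ [y]).sum - y = ys.sum := by simp
    rw [hsum, scanl_add_concat ys 0 y, List.dropLast_concat]
    have htail : ys.reverse.scanl (· - ·) ys.sum
        = ys.sum :: (ys.reverse.scanl (· - ·) ys.sum).tail := by
      cases h : ys.reverse <;> simp [List.scanl]
    conv_lhs => rw [htail]
    rw [List.reverse_cons, ih]
    conv_rhs => rw [scanl_add_self ys 0]
    simp

-- B equals the exclusive prefix sums of its cleaned list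
theorem alt_eq_scanl (csv_reader : List String) :
    waitTime_alt csv_reader
    = (((csv_reader.filter (fun p => p ≠ "Bursttime")).map
        (fun p => (PySem.Int.ofStr? p).getD 0)).scanl (· + ·) 0).dropLast := by
  simp only [waitTime_alt]
  rw [alt_fold_inv, List.nil_append, scanl_sub_reverse]

-- ===== VERDICT (by name: the statement is the Claim_ definition above) =====
theorem waitTime_spec : Claim_equal_waitTime := by
  intro csv_reader _ _
  unfold Spec_waitTime waitTime
  rw [alt_eq_scanl]
  exact waitTime_fold_inv csv_reader [] 0
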